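-- pv_equiv track=rewrite | github.com/n0whereRuoxi/CLAMA | RecursiveLearn/parameter_relationship_map.py | has_same_relationship
-- ===== SOURCE A (Python) =====
-- def has_same_relationship(state_list1, state_list2, pair_s1, pair_s2):
--     # Dictionary to store predicates for all elements
--     s1_dict = {}
--     s2_dict = {}
--
--     # Loop through each state and find the predicates of the given pairs
--     for state in state_list1:
--         predicate, p1, p2 = state.split()
--         if p1 not in s1_dict:
--             s1_dict[p1] = set()
--         s1_dict[p1].add((predicate, p2))
--
--     for state in state_list2:
--         predicate, p1, p2 = state.split()
--         if p1 not in s2_dict: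
--             s2_dict[p1] = set()
--         s2_dict[p1].add((predicate, p2))
--
--     # Get predicates for specific pairs
--     s1_pair_predicates = s1_dict.get(pair_s1[0], set())
--     s2_pair_predicates = s2_dict.get(pair_s2[0], set())
--
--     # Intersect predicates to check for common relationships
--     common_predicates = {pred for pred, obj in s1_pair_predicates if (pred, pair_s1[1]) in s1_pair_predicates}
--     common_predicates &= {pred for pred, obj in s2_pair_predicates if (pred, pair_s2[1]) in s2_pair_predicates}
--
--     return len(common_predicates) > 0
-- ===== SOURCE B (Python) =====
-- def has_same_relationship(state_list1, state_list2, pair_s1, pair_s2):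
--     # Filter predicates straight into two sets, no p1-keyed dicts.
--     parts1 = [state.split() for state in state_list1]
--     parts2 = [state.split() for state in state_list2]
--     preds1 = {pred for pred, p1, p2 in parts1 if p1 == pair_s1[0] and p2 == pair_s1[1]}
--     preds2 = {pred for pred, p1, p2 in parts2 if p1 == pair_s2[0] and p2 == pair_s2[1]}
--     return bool(preds1 & preds2)
-- ===== Notes on version B (the rewrite author's own statement) =====
-- stated objective: simpler
-- what changed: B drops A's p1-keyed dicts of (predicate, p2)-sets and the double-membership set comprehension, and instead filters each state list straight into a set of predicates whose (p1, p2) equals the queried pair, returning whether the two predicate sets intersect.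
import Mathlib
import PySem

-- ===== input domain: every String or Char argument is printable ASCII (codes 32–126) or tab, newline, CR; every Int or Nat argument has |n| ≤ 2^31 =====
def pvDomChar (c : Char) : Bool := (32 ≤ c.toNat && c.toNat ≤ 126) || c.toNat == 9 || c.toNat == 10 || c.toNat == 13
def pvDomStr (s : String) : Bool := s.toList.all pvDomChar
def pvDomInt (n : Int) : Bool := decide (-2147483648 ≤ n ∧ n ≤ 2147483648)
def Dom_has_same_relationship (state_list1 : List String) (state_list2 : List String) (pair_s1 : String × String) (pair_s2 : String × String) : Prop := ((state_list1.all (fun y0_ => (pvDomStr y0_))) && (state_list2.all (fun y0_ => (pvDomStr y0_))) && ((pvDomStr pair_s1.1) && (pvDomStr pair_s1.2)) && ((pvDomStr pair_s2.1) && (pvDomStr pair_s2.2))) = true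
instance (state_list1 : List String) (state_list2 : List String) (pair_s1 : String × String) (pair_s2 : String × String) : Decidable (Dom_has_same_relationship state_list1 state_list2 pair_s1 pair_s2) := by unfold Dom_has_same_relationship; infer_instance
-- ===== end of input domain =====

-- B drops A's p1-keyed dicts of (predicate, p2) sets and filters the matching
-- predicates straight into two sets (objective: simpler; same return value on Pre_).

-- ===== PORT A =====
-- the body of A's 'for state in …' loop: split, ensure a set under key p1, add (predicate, p2)
def aStep (d : PySem.Dict String (PySem.Set (String × String))) (state : String) :
    PySem.Dict String (PySem.Set (String × String)) :=
  match PySem.Str.split₀ state with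
  | [predicate, p1, p2] =>
      d.insert p1 (PySem.Set.add (d.getD p1 PySem.Set.empty) (predicate, p2))
  | _ => d  -- Python raises ValueError here (unpacking ≠ 3 parts); excluded by Pre_

def has_same_relationship (state_list1 : List String) (state_list2 : List String) (pair_s1 : String × String) (pair_s2 : String × String) : Bool :=
  let s1_dict := state_list1.foldl aStep PySem.Dict.empty
  let s2_dict := state_list2.foldl aStep PySem.Dict.empty
  let s1_pair_predicates := s1_dict.getD pair_s1.1 PySem.Set.empty
  let s2_pair_predicates := s2_dict.getD pair_s2.1 PySem.Set.empty
  let common1 : PySem.Set String := s1_pair_predicates.foldl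
    (fun acc pr => if PySem.Set.contains s1_pair_predicates (pr.1, pair_s1.2)
                   then PySem.Set.add acc pr.1 else acc) PySem.Set.empty
  let common_predicates : PySem.Set String := PySem.Set.inter common1
    (s2_pair_predicates.foldl
      (fun acc pr => if PySem.Set.contains s2_pair_predicates (pr.1, pair_s2.2)
                     then PySem.Set.add acc pr.1 else acc) PySem.Set.empty)
  decide (0 < common_predicates.length)

-- ===== PORT B =====
-- the set comprehension {pred for pred, p1, p2 in parts if p1 == pr[0] and p2 == pr[1]}
def bPreds (parts : List (List String)) (pr : String × String) : PySem.Set String :=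
  parts.foldl (fun acc p =>
    match p with
    | [pred, p1, p2] => if p1 == pr.1 && p2 == pr.2 then PySem.Set.add acc pred else acc
    | _ => acc)  -- Python raises ValueError here (unpacking ≠ 3 parts); excluded by Pre_
    PySem.Set.empty

def has_same_relationship_alt (state_list1 : List String) (state_list2 : List String) (pair_s1 : String × String) (pair_s2 : String × String) : Bool :=
  let parts1 := state_list1.map PySem.Str.split₀
  let parts2 := state_list2.map PySem.Str.split₀
  let preds1 := bPreds parts1 pair_s1
  let preds2 := bPreds parts2 pair_s2
  !(PySem.Set.inter preds1 preds2).isEmpty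

-- ===== PRECONDITION & SPEC =====
-- Pre_ excludes exactly the inputs where Python A raises ValueError: a state whose
-- whitespace split does not have exactly 3 tokens (the 3-way unpacking fails).
def Pre_has_same_relationship (state_list1 : List String) (state_list2 : List String) (pair_s1 : String × String) (pair_s2 : String × String) : Prop :=
  ∀ s ∈ state_list1 ++ state_list2, (PySem.Str.split₀ s).length = 3
instance (state_list1 : List String) (state_list2 : List String) (pair_s1 : String × String) (pair_s2 : String × String) : Decidable (Pre_has_same_relationship state_list1 state_list2 pair_s1 pair_s2) := by unfold Pre_has_same_relationship; infer_instance

def pvWitness_has_same_relationship : List String × List String × (String × String) × (String × String) :=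
  (["on a b", "near a b"], ["on a b"], ("a", "b"), ("a", "b"))

def Spec_has_same_relationship (state_list1 : List String) (state_list2 : List String) (pair_s1 : String × String) (pair_s2 : String × String) (out : Bool) : Prop := out = has_same_relationship_alt state_list1 state_list2 pair_s1 pair_s2
instance (state_list1 : List String) (state_list2 : List String) (pair_s1 : String × String) (pair_s2 : String × String) (out : Bool) : Decidable (Spec_has_same_relationship state_list1 state_list2 pair_s1 pair_s2 out) := by unfold Spec_has_same_relationship; infer_instance

-- ===== CLAIM (what is proved, stated in full; the proofs are below) =====
def Claim_equal_has_same_relationship : Prop := ∀ (state_list1 : List String) (state_list2 : List String) (pair_s1 : String × String) (pair_s2 : String × String), Dom_has_same_relationship state_list1 state_list2 pair_s1 pair_s2 → Pre_has_same_relationship state_list1 state_list2 pair_s1 pair_s2 → Spec_has_same_relationship state_list1 state_list2 pair_s1 pair_s2 (has_same_relationship state_list1 state_list2 pair_s1 pair_s2)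

-- ===== LEMMAS AND PROOFS =====

-- one step of A's dict-building loop, seen through getD at an arbitrary key
lemma mem_getD_aStep (d : PySem.Dict String (PySem.Set (String × String)))
    (s : String) (k : String) (x : String × String) :
    x ∈ (aStep d s).getD k PySem.Set.empty ↔
      x ∈ d.getD k PySem.Set.empty ∨ PySem.Str.split₀ s = [x.1, k, x.2] := by
  unfold aStep
  rcases hs : PySem.Str.split₀ s with _ | ⟨a, _ | ⟨b, _ | ⟨c, _ | ⟨e, t'⟩⟩⟩⟩
  · simp
  · simp
  · simp
  · rw [PySem.Dict.getD_insert]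
    by_cases hk : k = b
    · subst hk
      rw [if_pos rfl, PySem.Set.mem_add]
      obtain ⟨x1, x2⟩ := x
      simp only [Prod.mk.injEq, List.cons.injEq, and_true, true_and]
      constructor
      · rintro (h1 | ⟨rfl, rfl⟩); exacts [.inl h1, .inr ⟨rfl, rfl⟩]
      · rintro (h1 | ⟨rfl, rfl⟩); exacts [.inl h1, .inr ⟨rfl, rfl⟩]
    · rw [if_neg hk]
      constructor
      · exact .inl
      · rintro (h1 | he)
        · exact h1
        · simp only [List.cons.injEq] at he
          exact absurd he.2.1.symm hk
  · simp

-- A's dict-building loop: membership in the set stored under key k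
lemma mem_aDict (l : List String) (d : PySem.Dict String (PySem.Set (String × String)))
    (k : String) (x : String × String) :
    x ∈ (l.foldl aStep d).getD k PySem.Set.empty ↔
      x ∈ d.getD k PySem.Set.empty ∨ ∃ s ∈ l, PySem.Str.split₀ s = [x.1, k, x.2] := by
  induction l generalizing d with
  | nil => simp
  | cons s t ih =>
    rw [List.foldl_cons, ih, mem_getD_aStep]
    simp only [List.exists_mem_cons_iff]
    tauto

-- A's set comprehension over a set S: x is kept iff (x, y) ∈ S
lemma mem_filter_add {α β : Type} [BEq β] [LawfulBEq β] (l : List α) (q : α → Bool)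
    (f : α → β) (acc : PySem.Set β) (x : β) :
    x ∈ l.foldl (fun acc a => if q a then PySem.Set.add acc (f a) else acc) acc ↔
      x ∈ acc ∨ ∃ a ∈ l, q a ∧ f a = x := by
  induction l generalizing acc with
  | nil => simp
  | cons h t ih =>
    simp only [List.foldl_cons, ih]
    by_cases hq : q h = true
    · simp only [hq, if_true, PySem.Set.mem_add, List.mem_cons]
      constructor
      · rintro (⟨h1 | rfl⟩ | ⟨a, ha, hqa, rfl⟩)
        · exact .inl h1
        · exact .inr ⟨h, .inl rfl, hq, rfl⟩
        · exact .inr ⟨a, .inr ha, hqa, rfl⟩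
      · rintro (h1 | ⟨a, (rfl | ha), hqa, rfl⟩)
        · exact .inl (.inl h1)
        · exact .inl (.inr rfl)
        · exact .inr ⟨a, ha, hqa, rfl⟩
    · simp only [hq, if_false, List.mem_cons, Bool.false_eq_true]
      constructor
      · rintro (h1 | ⟨a, ha, hqa, rfl⟩)
        · exact .inl h1
        · exact .inr ⟨a, .inr ha, hqa, rfl⟩
      · rintro (h1 | ⟨a, (rfl | ha), hqa, rfl⟩)
        · exact .inl h1
        · exact absurd hqa hq
        · exact .inr ⟨a, ha, hqa, rfl⟩

lemma mem_aCommon (S : PySem.Set (String × String)) (y : String) (x : String) :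
    x ∈ S.foldl (fun acc pr => if PySem.Set.contains S (pr.1, y)
                 then PySem.Set.add acc pr.1 else acc) PySem.Set.empty ↔ (x, y) ∈ S := by
  rw [mem_filter_add]
  simp only [PySem.Set.empty, List.not_mem_nil, false_or, PySem.Set.contains_iff]
  constructor
  · rintro ⟨a, ha, hc, rfl⟩; exact hc
  · intro h; exact ⟨(x, y), h, h, rfl⟩

-- B's set comprehension
lemma mem_bPreds (parts : List (List String)) (pr : String × String) (x : String) :
    x ∈ bPreds parts pr ↔ [x, pr.1, pr.2] ∈ parts := by
  unfold bPreds
  suffices h : ∀ acc : PySem.Set String,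
      x ∈ parts.foldl (fun acc p =>
        match p with
        | [pred, p1, p2] => if p1 == pr.1 && p2 == pr.2 then PySem.Set.add acc pred else acc
        | _ => acc) acc ↔ x ∈ acc ∨ [x, pr.1, pr.2] ∈ parts by
    simpa [PySem.Set.empty] using h PySem.Set.empty
  induction parts with
  | nil => simp
  | cons p t ih =>
    intro acc
    rw [List.foldl_cons, ih, List.mem_cons]
    rcases p with _ | ⟨a, _ | ⟨b, _ | ⟨c, _ | ⟨e, t'⟩⟩⟩⟩
    · simp
    · simp
    · simp
    · have hred : (match [a, b, c] with
          | [pred, p1, p2] => if (p1 == pr.1 && p2 == pr.2) = true then PySem.Set.add acc pred else acc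
          | _ => acc) = if (b == pr.1 && c == pr.2) = true then PySem.Set.add acc a else acc := rfl
      rw [hred]
      by_cases hm : (b == pr.1 && c == pr.2) = true
      · rw [if_pos hm]
        simp only [Bool.and_eq_true, beq_iff_eq] at hm
        obtain ⟨rfl, rfl⟩ := hm
        simp only [PySem.Set.mem_add, List.cons.injEq, and_true]
        constructor
        · rintro ((h1 | rfl) | h2)
          exacts [.inl h1, .inr (.inl rfl), .inr (.inr h2)]
        · rintro (h1 | (⟨rfl, -⟩ | h3))
          exacts [.inl (.inl h1), .inl (.inr rfl), .inr h3]
      · rw [if_neg hm]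
        simp only [Bool.and_eq_true, beq_iff_eq] at hm
        constructor
        · rintro (h1 | h2); exacts [.inl h1, .inr (.inr h2)]
        · rintro (h1 | (h2 | h3))
          · exact .inl h1
          · exfalso; simp at h2; exact hm ⟨h2.2.1.symm, h2.2.2.symm⟩
          · exact .inr h3
    · simp

-- nonemptiness of two member-equal lists, in A's and B's result forms
lemma bool_len_pos_eq_not_isEmpty {α : Type} (L M : List α) (h : ∀ y, y ∈ L ↔ y ∈ M) :
    decide (0 < L.length) = !M.isEmpty := by
  cases L with
  | nil =>
    cases M with
    | nil => simp
    | cons m ms => exact absurd ((h m).mpr (by simp)) (by simp)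
  | cons a as =>
    cases M with
    | nil => exact absurd ((h a).mp (by simp)) (by simp)
    | cons m ms => simp

-- ===== VERDICT (by name: the statement is the Claim_ definition above) =====
theorem has_same_relationship_spec : Claim_equal_has_same_relationship := by
  intro l1 l2 ps1 ps2 _hdom _hpre
  unfold Spec_has_same_relationship
  simp only [has_same_relationship, has_same_relationship_alt]
  have hmem : ∀ y : String,
      (y ∈ PySem.Set.inter
        ((l1.foldl aStep PySem.Dict.empty).getD ps1.1 PySem.Set.empty |>.foldl
          (fun acc pr => if PySem.Set.contains ((l1.foldl aStep PySem.Dict.empty).getD ps1.1 PySem.Set.empty) (pr.1, ps1.2)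
                         then PySem.Set.add acc pr.1 else acc) PySem.Set.empty)
        ((l2.foldl aStep PySem.Dict.empty).getD ps2.1 PySem.Set.empty |>.foldl
          (fun acc pr => if PySem.Set.contains ((l2.foldl aStep PySem.Dict.empty).getD ps2.1 PySem.Set.empty) (pr.1, ps2.2)
                         then PySem.Set.add acc pr.1 else acc) PySem.Set.empty)) ↔
      (y ∈ PySem.Set.inter (bPreds (l1.map PySem.Str.split₀) ps1) (bPreds (l2.map PySem.Str.split₀) ps2)) := by
    intro y
    rw [PySem.Set.mem_inter, PySem.Set.mem_inter, mem_aCommon, mem_aCommon,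
        mem_bPreds, mem_bPreds, mem_aDict, mem_aDict]
    simp [PySem.Dict.getD_empty, PySem.Set.empty, List.mem_map]
  exact bool_len_pos_eq_not_isEmpty _ _ hmem
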